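-- pv_equiv track=rewrite | github.com/banana-galaxy/challenges | challenge16(CardTiming)/solutions/FelipeAg.py | solution
-- ===== SOURCE A (Python) =====
-- def solution(s):
--     months_31 = [1, 3, 5, 7, 8, 10, 12]
--     months_30 = [4, 6, 9, 11]
--     ans = []
--     if s == 30:
--         for month in months_30:
--             if month + 1 == 2 and 28 not in ans:
--                 ans += [28]
--             elif month + 1 in months_30 and 30 not in ans:
--                 ans += [30]
--             elif month + 1 in months_31 and 31 not in ans:
--                 ans += [31]
--     elif s == 31:
--         for month in months_31:
--             if month + 1 == 2 and 28 not in ans: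
--                 ans += [28]
--             elif month + 1 in months_30 and 30 not in ans:
--                 ans += [30]
--             elif month + 1 in months_31 and 31 not in ans:
--                 ans += [31]
--     else:
--         ans += [31]
--     return ans
-- ===== SOURCE B (Python) =====
-- def solution(s):
--     # Closed form: only a 31-day month can precede February/a 30-day month,
--     # so the deduped answer is [28, 30, 31] for s == 31 and [31] otherwise.
--     return [28, 30, 31] if s == 31 else [31]
-- ===== Notes on version B (the rewrite author's own statement) =====
-- stated objective: simpler
-- what changed: Replaced A's month-list iteration with dedup-membership tests by the closed-form answer: [28,30,31] when s == 31, else [31].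
import Mathlib
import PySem

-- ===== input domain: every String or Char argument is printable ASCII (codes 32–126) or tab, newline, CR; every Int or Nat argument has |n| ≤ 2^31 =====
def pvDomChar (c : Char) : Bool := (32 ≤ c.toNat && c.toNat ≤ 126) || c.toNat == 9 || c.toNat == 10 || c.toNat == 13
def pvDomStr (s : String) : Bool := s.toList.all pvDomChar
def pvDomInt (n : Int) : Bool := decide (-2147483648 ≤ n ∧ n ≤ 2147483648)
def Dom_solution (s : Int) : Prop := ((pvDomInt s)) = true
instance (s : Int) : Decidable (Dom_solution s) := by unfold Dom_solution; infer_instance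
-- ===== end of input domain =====

-- B replaces A's month-loop with the closed-form mapping; objective: simpler.

-- ===== PORT A =====
-- one loop body step of A's for-loops (same branch order as the Python)
def solutionStep (months31 months30 : List Int) (ans : List Int) (month : Int) : List Int :=
  if month + 1 == 2 && !(ans.contains 28) then ans ++ [28]
  else if months30.contains (month + 1) && !(ans.contains 30) then ans ++ [30]
  else if months31.contains (month + 1) && !(ans.contains 31) then ans ++ [31]
  else ans

def solution (s : Int) : List Int :=
  let months31 : List Int := [1, 3, 5, 7, 8, 10, 12]
  let months30 : List Int := [4, 6, 9, 11]
  if s == 30 then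
    months30.foldl (solutionStep months31 months30) []
  else if s == 31 then
    months31.foldl (solutionStep months31 months30) []
  else
    [] ++ [31]

-- ===== PORT B =====
def solution_alt (s : Int) : List Int :=
  if s == 31 then [28, 30, 31] else [31]

-- ===== PRECONDITION & SPEC =====
def Spec_solution (s : Int) (out : List Int) : Prop := out = solution_alt s
instance (s : Int) (out : List Int) : Decidable (Spec_solution s out) := by unfold Spec_solution; infer_instance

-- ===== CLAIM (what is proved, stated in full; the proofs are below) =====
def Claim_equal_solution : Prop := ∀ (s : Int), Dom_solution s → Spec_solution s (solution s)

-- ===== LEMMAS AND PROOFS =====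

-- ===== VERDICT (by name: the statement is the Claim_ definition above) =====
theorem solution_spec : Claim_equal_solution := by
  intro s _
  unfold Spec_solution solution solution_alt
  by_cases h30 : s = 30
  · subst h30; decide
  · by_cases h31 : s = 31
    · subst h31; decide
    · simp [h30, h31]
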